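-- pv_equiv track=rewrite | github.com/miliar/Code_Jam_Webscraper | solutions_python/Problem_178/3348.py | pancakes
-- ===== SOURCE A (Python) =====
-- def flipPancakes ( pancakeString ) :
--     outputString = ""
--
--     if pancakeString[0] == "+":
--         for i in pancakeString:
--             outputString += "-"
--     else:
--         for i in pancakeString:
--             outputString +="+"
--
--     return outputString
--
-- def pancakes( stackOfPancakes ):
--
--     pancakeStack = ""
--     counter = 0
--
--     for i in stackOfPancakes:
--         if len(pancakeStack) == 0:
--             pancakeStack += i
--             continue
--         elif (len(pancakeStack) > 0 and i == pancakeStack[-1]):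
--             pancakeStack += i
--             continue
--         else:
--             pancakeStack = flipPancakes(pancakeStack)
--             pancakeStack += i
--             counter += 1
--             continue
--
--     if pancakeStack[0] == "+":
--         return counter
--     else:
--         return counter + 1
-- ===== SOURCE B (Python) =====
-- def pancakes(stackOfPancakes):
--     s = stackOfPancakes
--     flips = sum(a != b for a, b in zip(s, s[1:]))
--     if flips == 0:
--         facing_up = s[0] == "+"
--     else:
--         facing_up = (s[0] == "+") == (flips % 2 == 0)
--     return flips + (0 if facing_up else 1)
-- ===== Notes on version B (the rewrite author's own statement) =====
-- stated objective: faster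
-- what changed: Replaces A's simulation that rebuilds the whole stack string on every flip with a single zip-pass that counts adjacent unequal pairs and a parity formula deciding the final facing.
import Mathlib
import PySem

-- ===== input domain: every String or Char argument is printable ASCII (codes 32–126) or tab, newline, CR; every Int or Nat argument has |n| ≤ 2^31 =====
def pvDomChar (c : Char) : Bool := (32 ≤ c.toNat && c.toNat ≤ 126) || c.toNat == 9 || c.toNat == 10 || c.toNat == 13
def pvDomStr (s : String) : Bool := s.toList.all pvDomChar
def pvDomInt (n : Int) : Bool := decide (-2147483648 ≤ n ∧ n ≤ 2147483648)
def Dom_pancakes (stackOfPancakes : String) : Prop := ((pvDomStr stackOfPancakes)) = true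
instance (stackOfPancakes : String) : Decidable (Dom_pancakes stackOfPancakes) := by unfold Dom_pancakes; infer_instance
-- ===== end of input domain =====

-- B replaces A's quadratic stack-rebuilding simulation by a single zip-pass counting
-- adjacent unequal pairs plus a parity formula for the final facing (objective: faster).

-- ===== PORT A =====
def flipPancakes (pancakeString : List Char) : List Char :=
  if PySem.List.pyGet? pancakeString 0 = some '+' then
    pancakeString.foldl (fun acc _ => acc ++ ['-']) []
  else
    pancakeString.foldl (fun acc _ => acc ++ ['+']) []

def pancakesStep (st : List Char × Int) (i : Char) : List Char × Int :=
  if st.1.length = 0 then (st.1 ++ [i], st.2)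
  else if st.1.length > 0 ∧ PySem.List.pyGet? st.1 (-1) = some i then (st.1 ++ [i], st.2)
  else (flipPancakes st.1 ++ [i], st.2 + 1)

def pancakes (stackOfPancakes : String) : Int :=
  let st := stackOfPancakes.toList.foldl pancakesStep ([], 0)
  if PySem.List.pyGet? st.1 0 = some '+' then st.2 else st.2 + 1

-- ===== PORT B =====
def pancakes_alt (stackOfPancakes : String) : Int :=
  let l := stackOfPancakes.toList
  let flips : Int := ((l.zip (PySem.List.slice l (some 1) none)).countP
    (fun p => decide (p.1 ≠ p.2)) : Nat)
  let facingUp : Bool :=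
    if flips = 0 then decide (PySem.List.pyGet? l 0 = some '+')
    else decide ((PySem.List.pyGet? l 0 = some '+') ↔ PySem.Int.mod flips 2 = 0)
  flips + (if facingUp then 0 else 1)

-- ===== PRECONDITION & SPEC =====
-- Pre_ excludes only the empty string, on which A raises IndexError (pancakeStack[0]).
def Pre_pancakes (stackOfPancakes : String) : Prop := stackOfPancakes.toList ≠ []
instance (stackOfPancakes : String) : Decidable (Pre_pancakes stackOfPancakes) := by
  unfold Pre_pancakes; infer_instance

def pvWitness_pancakes : String := "-++-"

def Spec_pancakes (stackOfPancakes : String) (out : Int) : Prop := out = pancakes_alt stackOfPancakes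
instance (stackOfPancakes : String) (out : Int) : Decidable (Spec_pancakes stackOfPancakes out) := by
  unfold Spec_pancakes; infer_instance

-- ===== CLAIM (what is proved, stated in full; the proofs are below) =====
def Claim_equal_pancakes : Prop := ∀ (stackOfPancakes : String), Dom_pancakes stackOfPancakes → Pre_pancakes stackOfPancakes → Spec_pancakes stackOfPancakes (pancakes stackOfPancakes)

-- ===== LEMMAS AND PROOFS =====

-- abstract state of A's loop: (first char of stack, last char of stack, counter)
def pancakesAbs (st : Char × Char × Int) (i : Char) : Char × Char × Int :=
  if i = st.2.1 then st
  else ((if st.1 = '+' then '-' else '+'), i, st.2.2 + 1)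

theorem flipPancakes_eq (stack : List Char) (h : stack ≠ []) :
    flipPancakes stack =
      List.replicate stack.length (if stack.head h = '+' then '-' else '+') := by
  obtain ⟨a, t, rfl⟩ := List.exists_cons_of_ne_nil h
  simp [flipPancakes, List.map_const']
  split <;> simp_all [List.replicate_succ]

theorem pancakesLoop_abs (rest stack : List Char) (c : Int) (h : stack ≠ []) :
    ∃ h' : (rest.foldl pancakesStep (stack, c)).1 ≠ [],
      ((rest.foldl pancakesStep (stack, c)).1.head h',
       (rest.foldl pancakesStep (stack, c)).1.getLast h',
       (rest.foldl pancakesStep (stack, c)).2)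
      = rest.foldl pancakesAbs (stack.head h, stack.getLast h, c) := by
  induction rest generalizing stack c with
  | nil => exact ⟨h, rfl⟩
  | cons i rest ih =>
    simp only [List.foldl_cons]
    have hlen : ¬ stack.length = 0 := by simpa using h
    by_cases hi : i = stack.getLast h
    · have hstep : pancakesStep (stack, c) i = (stack ++ [i], c) := by
        simp [pancakesStep, hlen, PySem.List.pyGet?_neg_one,
          List.getLast?_eq_getLast_of_ne_nil h, hi, Nat.pos_of_ne_zero hlen]
      simp only [hstep]
      have hne : stack ++ [i] ≠ [] := by simp
      obtain ⟨h', heq⟩ := ih (stack ++ [i]) c hne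
      refine ⟨h', ?_⟩
      rw [heq]
      have h1 : (stack ++ [i]).head hne = stack.head h := by
        obtain ⟨a, t, rfl⟩ := List.exists_cons_of_ne_nil h; rfl
      have h2 : (stack ++ [i]).getLast hne = i := List.getLast_append_singleton _
      rw [h1, h2, pancakesAbs, if_pos hi, hi]
    · have hstep : pancakesStep (stack, c) i = (flipPancakes stack ++ [i], c + 1) := by
        simp only [pancakesStep]
        rw [if_neg hlen, if_neg]
        simp [PySem.List.pyGet?_neg_one, List.getLast?_eq_getLast_of_ne_nil h]
        intro _; exact fun hc => hi hc.symm
      simp only [hstep]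
      have hne : flipPancakes stack ++ [i] ≠ [] := by simp
      obtain ⟨h', heq⟩ := ih (flipPancakes stack ++ [i]) (c + 1) hne
      refine ⟨h', ?_⟩
      rw [heq]
      have h1 : (flipPancakes stack ++ [i]).head hne
          = (if stack.head h = '+' then '-' else '+') := by
        have hf := flipPancakes_eq stack h
        cases hs : stack.length with
        | zero => exact absurd hs hlen
        | succ n =>
          rw [hs, List.replicate_succ] at hf
          simp [hf]
      have h2 : (flipPancakes stack ++ [i]).getLast hne = i := List.getLast_append_singleton _
      rw [h1, h2, pancakesAbs, if_neg hi]

def bcount (l : Char) (rest : List Char) : Nat :=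
  ((l :: rest).zip rest).countP (fun p => decide (p.1 ≠ p.2))

theorem pancakesAbs_spec (rest : List Char) (f l : Char) (c : Int) :
    (rest.foldl pancakesAbs (f, l, c)).2.2 = c + (bcount l rest : Int) ∧
    ((rest.foldl pancakesAbs (f, l, c)).1 = '+' ↔
      (if bcount l rest = 0 then f = '+' else (f = '+' ↔ bcount l rest % 2 = 0))) := by
  induction rest generalizing f l c with
  | nil => simp [bcount]
  | cons i rest ih =>
    by_cases hi : i = l
    · have hb : bcount l (i :: rest) = bcount i rest := by
        simp [bcount, List.zip_cons_cons, hi]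
      rw [List.foldl_cons, pancakesAbs, if_pos hi]
      obtain ⟨ha, hf⟩ := ih f i c
      subst hi
      exact ⟨by rw [ha, hb], by rw [hf, hb]⟩
    · have hb : bcount l (i :: rest) = bcount i rest + 1 := by
        simp [bcount, List.zip_cons_cons, Ne.symm hi, Nat.add_comm]
      rw [List.foldl_cons, pancakesAbs, if_neg hi]
      obtain ⟨ha, hf⟩ := ih (if f = '+' then '-' else '+') i (c + 1)
      constructor
      · rw [ha, hb]; push_cast; ring
      · rw [hf, hb]
        have htog : ((if f = '+' then '-' else '+') = '+') ↔ ¬ (f = '+') := by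
          split <;> simp_all
        rw [if_neg (by omega : ¬ bcount i rest + 1 = 0)]
        by_cases h0 : bcount i rest = 0
        · rw [if_pos h0, htog]
          by_cases hfp : f = '+' <;> simp_all
        · rw [if_neg h0, htog]
          by_cases hfp : f = '+' <;> simp [hfp] <;> omega

-- ===== VERDICT (by name: the statement is the Claim_ definition above) =====
theorem pancakes_spec : Claim_equal_pancakes := by
  intro s _ hpre
  unfold Spec_pancakes pancakes pancakes_alt
  dsimp only
  obtain ⟨a, t, hst⟩ := List.exists_cons_of_ne_nil hpre
  rw [hst]
  have hslice : PySem.List.slice (a :: t) (some 1) none = t := by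
    have := PySem.List.slice_from_natCast (xs := a :: t) (a := 1)
    simpa using this
  rw [hslice]
  -- first loop iteration: empty stack
  have h0 : List.foldl pancakesStep ([], 0) (a :: t)
      = List.foldl pancakesStep ([a], 0) t := by
    simp [pancakesStep]
  rw [h0]
  obtain ⟨h', heq⟩ := pancakesLoop_abs t [a] 0 (by simp)
  obtain ⟨ha, hf⟩ := pancakesAbs_spec t a a 0
  simp only [List.head_cons, List.getLast_singleton] at heq
  have hbd : List.countP (fun p => decide (p.1 ≠ p.2)) ((a :: t).zip t) = bcount a t := rfl
  rw [hbd]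
  have hc : (List.foldl pancakesStep ([a], 0) t).2 = (bcount a t : Int) := by
    have := congrArg (fun p => p.2.2) heq
    simp only at this
    rw [this, ha]; ring
  have hhd : (List.foldl pancakesStep ([a], 0) t).1.head h'
      = (List.foldl pancakesAbs (a, a, 0) t).1 := congrArg (fun p => p.1) heq
  have hgen : ∀ (L : List Char) (hL : L ≠ []), PySem.List.pyGet? L 0 = some (L.head hL) := by
    intro L hL
    obtain ⟨b, u, rfl⟩ := List.exists_cons_of_ne_nil hL
    exact PySem.List.pyGet?_zero_cons b u
  have hget := hgen _ h'
  have hget0 : PySem.List.pyGet? (a :: t) 0 = some a := PySem.List.pyGet?_zero_cons a t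
  rw [hget, hget0, hc]
  have hcond : (some ((List.foldl pancakesStep ([a], 0) t).1.head h') = some '+')
      ↔ (if bcount a t = 0 then a = '+' else (a = '+' ↔ bcount a t % 2 = 0)) := by
    rw [Option.some_inj, hhd]; exact hf
  have hmod : PySem.Int.mod ((bcount a t : Nat) : Int) 2 = 0 ↔ bcount a t % 2 = 0 := by
    rw [PySem.Int.mod_eq_emod_of_pos (by omega : (0:Int) < 2)]; omega
  have hcond2 : (some ((List.foldl pancakesStep ([a], 0) t).1.head h') = some '+')
      ↔ ((if ((bcount a t : Nat) : Int) = 0 then decide (some a = some '+')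
         else decide ((some a = some '+') ↔ PySem.Int.mod ((bcount a t : Nat) : Int) 2 = 0)) = true) := by
    rw [hcond]
    by_cases hz : bcount a t = 0
    · simp [hz]
    · rw [if_neg (by omega : ¬ ((bcount a t : Nat) : Int) = 0), if_neg hz]
      simp only [decide_eq_true_eq, Option.some_inj]
      rw [hmod]
  by_cases hp : some ((List.foldl pancakesStep ([a], 0) t).1.head h') = some '+'
  · rw [if_pos hp, if_pos (hcond2.mp hp)]; ring
  · rw [if_neg hp, if_neg (fun hh => hp (hcond2.mpr hh))]
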